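-- pv_equiv track=rewrite | github.com/Wil10w/Beginner-Library-3 | Dictionaries/TooManyNames2.py | name_lists
-- ===== SOURCE A (Python) =====
-- def name_lists(alistOfNames):
--
--     alist = []
--     b = ''
--
--     for i in alistOfNames:
--
--         b = i.split()
--         alist.append(b[0])
--
--         aDict = {}
--
--
--     for word in alist:
--         if word in aDict:
--             pass
--         else:
--             aDict[word] =[]
--
--     for i in aDict:
--         for j in alistOfNames:
--             if i in j:
--                 aDict[i].append(j)
--             else:
--                 pass
--     return aDict
-- ===== SOURCE B (Python) =====
-- def name_lists(alistOfNames):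
--     # Substring-dictionary matching: instead of testing every key against every
--     # name, enumerate each name's substrings up to the longest key length and
--     # look them up in the key-indexed hash table; append once per matched key.
--     buckets = {}
--     for name in alistOfNames:
--         first = name.split()[0]
--         if first not in buckets:
--             buckets[first] = []
--     maxlen = 0
--     for k in buckets:
--         if maxlen < len(k):
--             maxlen = len(k)
--     for name in alistOfNames:
--         matched = set()
--         for p in range(len(name)):
--             for l in range(1, min(maxlen, len(name) - p) + 1):
--                 sub = name[p:p + l]
--                 if sub in buckets:
--                     matched.add(sub)
--         for key in matched:
--             buckets[key].append(name)
--     return buckets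
-- ===== Notes on version B (the rewrite author's own statement) =====
-- stated objective: faster
-- what changed: B replaces A's per-key scan of the whole name list by substring-dictionary matching: for each name it enumerates the name's substrings of length 1..longest-key and looks each up in the hash table of first-name keys, then appends the name once to every matched bucket, so the cost no longer grows with the number of distinct keys.
import Mathlib
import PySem

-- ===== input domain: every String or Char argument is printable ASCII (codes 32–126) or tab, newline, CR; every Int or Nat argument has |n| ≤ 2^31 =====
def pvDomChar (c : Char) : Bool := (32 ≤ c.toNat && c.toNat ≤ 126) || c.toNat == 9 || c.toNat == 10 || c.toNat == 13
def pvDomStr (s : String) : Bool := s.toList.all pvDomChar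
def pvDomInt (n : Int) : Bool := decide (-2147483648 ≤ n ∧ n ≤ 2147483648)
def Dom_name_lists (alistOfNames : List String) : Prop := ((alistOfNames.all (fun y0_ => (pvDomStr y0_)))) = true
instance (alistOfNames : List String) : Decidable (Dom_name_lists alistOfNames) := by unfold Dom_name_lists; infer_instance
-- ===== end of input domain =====

-- B replaces A's per-key scan of the name list by substring-dictionary matching
-- (each name's substrings up to the longest key length are looked up in the key table),
-- removing the dependence on the number of distinct keys; objective: faster (measured).


-- ===== PORT A =====
-- A: build alist of first tokens; dedup them into aDict with empty-list values; then for each key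
-- scan the whole name list and append every name containing the key. b[0] on an empty split raises
-- IndexError in Python (excluded by Pre_); the port uses pyGetD with a default only to stay total.
-- Python's `for i in aDict` iterates while mutating only values, so the key list is a fixed snapshot.
def name_lists (alistOfNames : List String) : List (String × List String) :=
  let alist : List String :=
    alistOfNames.foldl (fun acc i => acc ++ [PySem.List.pyGetD (PySem.Str.split₀ i) 0 ""]) []
  let aDict : PySem.Dict String (List String) := PySem.Dict.empty
  let aDict := alist.foldl (fun d word => if d.contains word then d else d.insert word []) aDict
  let aDict := aDict.keys.foldl (fun d i =>
      alistOfNames.foldl (fun d j =>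
        if PySem.Str.isIn i j then d.modify i [] (fun l => l ++ [j]) else d) d) aDict
  aDict.items

-- ===== PORT B =====
-- B: phase 1 builds the deduplicated first-token buckets and the longest key length;
-- phase 2, for each name, collects the set of keys occurring in it by enumerating the
-- name's substrings of length 1..maxlen and looking each up in the bucket table, then
-- appends the name once to every matched bucket (matched keys are distinct buckets,
-- so the set's iteration order cannot affect the result).
def pvKeyOf (name : String) : String :=
  PySem.List.pyGetD (PySem.Str.split₀ name) 0 ""

def pvBuckets (alistOfNames : List String) : PySem.Dict String (List String) :=
  alistOfNames.foldl (fun d name =>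
    if d.contains (pvKeyOf name) then d else d.insert (pvKeyOf name) []) PySem.Dict.empty

def pvMatched (d : PySem.Dict String (List String)) (maxlen : Int) (name : String) :
    PySem.Set String :=
  let n := PySem.Str.len name
  (PySem.List.pyRange 0 n 1).foldl (fun m p =>
    (PySem.List.pyRange 1 (min maxlen (n - p) + 1) 1).foldl (fun m l =>
      if d.contains (PySem.Str.slice name (some p) (some (p + l))) then
        PySem.Set.add m (PySem.Str.slice name (some p) (some (p + l)))
      else m) m) PySem.Set.empty

def name_lists_alt (alistOfNames : List String) : List (String × List String) :=
  let buckets := pvBuckets alistOfNames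
  let maxlen : Int := buckets.keys.foldl
    (fun m k => if m < PySem.Str.len k then PySem.Str.len k else m) 0
  (alistOfNames.foldl (fun d name =>
      (pvMatched d maxlen name).foldl
        (fun d key => d.modify key [] (fun lst => lst ++ [name])) d) buckets).items

-- ===== PRECONDITION & SPEC =====
-- Pre_ excludes exactly the inputs on which Python A raises: the empty list (NameError: aDict is
-- only assigned inside the first loop) and lists with a whitespace-only/empty name (IndexError on b[0]).
def Pre_name_lists (alistOfNames : List String) : Prop :=
  alistOfNames ≠ [] ∧ ∀ s ∈ alistOfNames, PySem.Str.split₀ s ≠ []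
instance (alistOfNames : List String) : Decidable (Pre_name_lists alistOfNames) := by
  unfold Pre_name_lists; infer_instance
def pvWitness_name_lists : List String := ["Ann Lee", "Bob"]

def Spec_name_lists (alistOfNames : List String) (out : List (String × List String)) : Prop :=
  out = name_lists_alt alistOfNames
instance (alistOfNames : List String) (out : List (String × List String)) :
    Decidable (Spec_name_lists alistOfNames out) := by unfold Spec_name_lists; infer_instance

-- ===== CLAIM (what is proved, stated in full; the proofs are below) =====
def Claim_equal_name_lists : Prop := ∀ (alistOfNames : List String),
  Dom_name_lists alistOfNames → Pre_name_lists alistOfNames →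
  Spec_name_lists alistOfNames (name_lists alistOfNames)
-- ===== LEMMAS AND PROOFS =====

-- the matching step of A's inner loop, as a value transformer on the dict
def pvStep (j k : String) (d : PySem.Dict String (List String)) : PySem.Dict String (List String) :=
  if PySem.Str.isIn k j then d.modify k [] (fun l => l ++ [j]) else d

-- aDict[k].append(j): with nodup keys, modifying an existing key rewrites exactly its entry in place
lemma pv_modify_items (d : PySem.Dict String (List String)) (k : String)
    (f : List String → List String) (hn : d.keys.Nodup) (hk : k ∈ d.keys) :
    (d.modify k [] f).items = d.items.map (fun p => if p.1 = k then (k, f p.2) else p) := by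
  have hc : d.contains k = true := by
    simpa [PySem.Dict.contains_iff_mem_keys] using hk
  simp only [PySem.Dict.modify, PySem.Dict.insert, hc, if_pos]
  apply List.map_congr_left
  intro p hp
  by_cases h : p.1 = k
  · have hmem : (k, p.2) ∈ d.items := by
      have : p = (k, p.2) := by cases p; simp_all
      rwa [this] at hp
    have := PySem.Dict.get?_of_mem_items d hmem hn
    simp [h, PySem.Dict.getD, this]
  · simp [h]

lemma pv_modify_keys (j k : String) (d : PySem.Dict String (List String)) (hk : k ∈ d.keys) :
    (d.modify k [] (fun l => l ++ [j])).keys = d.keys := by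
  have hc : d.contains k = true := by
    simpa [PySem.Dict.contains_iff_mem_keys] using hk
  simp [PySem.Dict.keys_modify, PySem.Dict.keys_insert_of_contains, hc]

lemma pv_step_keys (j k : String) (d : PySem.Dict String (List String)) (hk : k ∈ d.keys) :
    (pvStep j k d).keys = d.keys := by
  unfold pvStep
  split
  · exact pv_modify_keys j k d hk
  · rfl

lemma pv_step_items (j k : String) (d : PySem.Dict String (List String))
    (hn : d.keys.Nodup) (hk : k ∈ d.keys) :
    (pvStep j k d).items = d.items.map (fun p =>
      if p.1 = k then (p.1, p.2 ++ if PySem.Str.isIn k j then [j] else []) else p) := by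
  unfold pvStep
  split
  · rw [pv_modify_items d k _ hn hk]
    apply List.map_congr_left
    intro p hp
    obtain ⟨a, b⟩ := p
    by_cases h : a = k <;> simp [h]
  · next hne =>
    symm
    apply (List.map_congr_left ?_).trans (List.map_id _)
    intro p hp
    obtain ⟨a, b⟩ := p
    by_cases h : a = k <;> simp [h]

-- A's inner loop for one key: its entry gets exactly the names containing it, in list order
lemma pv_scanA (names : List String) (k : String) (d : PySem.Dict String (List String))
    (hn : d.keys.Nodup) (hk : k ∈ d.keys) :
    (names.foldl (fun d j => pvStep j k d) d).items
      = d.items.map (fun p =>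
          if p.1 = k then (p.1, p.2 ++ names.filter (fun j => PySem.Str.isIn k j)) else p) := by
  induction names generalizing d with
  | nil =>
    simp only [List.foldl_nil, List.filter_nil]
    symm
    apply List.map_congr_left ?_ |>.trans (List.map_id _)
    intro p hp
    obtain ⟨a, b⟩ := p
    by_cases h : a = k <;> simp [h]
  | cons j rest ih =>
    have hkeys : (pvStep j k d).keys = d.keys := pv_step_keys j k d hk
    rw [List.foldl_cons, ih _ (hkeys ▸ hn) (hkeys ▸ hk), pv_step_items j k d hn hk, List.map_map]
    apply List.map_congr_left
    intro p hp
    by_cases h : p.1 = k <;> by_cases h2 : PySem.Str.isIn k j = true <;>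
      simp only [PySem.Str.isIn] at h2 <;>
      simp [Function.comp, PySem.Str.isIn, h, h2]

lemma pv_scan_keys (names : List String) (k : String) (d : PySem.Dict String (List String))
    (hk : k ∈ d.keys) :
    (names.foldl (fun d j => pvStep j k d) d).keys = d.keys := by
  induction names generalizing d with
  | nil => rfl
  | cons j rest ih =>
    rw [List.foldl_cons, ih _ (pv_step_keys j k d hk ▸ hk), pv_step_keys j k d hk]

-- A's matching phase (outer loop over keys): every entry gets its matching names
lemma pv_outerA (names : List String) (L : List String) (d : PySem.Dict String (List String))
    (hL : L.Nodup) (hsub : ∀ k ∈ L, k ∈ d.keys) (hn : d.keys.Nodup) :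
    (L.foldl (fun d i => names.foldl (fun d j => pvStep j i d) d) d).items
      = d.items.map (fun p =>
          if p.1 ∈ L then (p.1, p.2 ++ names.filter (fun j => PySem.Str.isIn p.1 j)) else p) := by
  induction L generalizing d with
  | nil =>
    symm
    apply (List.map_congr_left ?_).trans (List.map_id _)
    intro p hp; simp
  | cons i rest ih =>
    have hi : i ∈ d.keys := hsub i (by simp)
    have hkeys : (names.foldl (fun d j => pvStep j i d) d).keys = d.keys := pv_scan_keys names i d hi
    rw [List.foldl_cons, ih _ hL.of_cons (fun k hk => hkeys ▸ hsub k (by simp [hk])) (hkeys ▸ hn),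
        pv_scanA names i d hn hi, List.map_map]
    apply List.map_congr_left
    intro p hp
    obtain ⟨a, b⟩ := p
    have hinotrest : i ∉ rest := (List.nodup_cons.mp hL).1
    by_cases h : a = i
    · subst h
      simp [hinotrest]
    · by_cases h2 : a ∈ rest <;> simp [Function.comp, h, h2]

-- membership in a conditional-add set-building fold
lemma pv_mem_foldl_if_add {α β : Type} [BEq β] [LawfulBEq β] (L : List α) (c : α → Bool)
    (g : α → β) (m : PySem.Set β) (y : β) :
    (y ∈ L.foldl (fun m x => if c x then PySem.Set.add m (g x) else m) m)
      ↔ (y ∈ m ∨ ∃ x ∈ L, c x = true ∧ y = g x) := by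
  induction L generalizing m with
  | nil => simp
  | cons a rest ih =>
    rw [List.foldl_cons]
    by_cases h : c a = true
    · rw [if_pos h, ih]
      constructor
      · rintro (hm | ⟨x, hx, hc, rfl⟩)
        · rcases (PySem.Set.mem_add _ _ _).mp hm with hm | rfl
          · exact Or.inl hm
          · exact Or.inr ⟨a, by simp, h, rfl⟩
        · exact Or.inr ⟨x, by simp [hx], hc, rfl⟩
      · rintro (hm | ⟨x, hx, hc, rfl⟩)
        · exact Or.inl ((PySem.Set.mem_add _ _ _).mpr (Or.inl hm))
        · rcases List.mem_cons.mp hx with rfl | hx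
          · exact Or.inl ((PySem.Set.mem_add _ _ _).mpr (Or.inr rfl))
          · exact Or.inr ⟨x, hx, hc, rfl⟩
    · rw [if_neg h, ih]
      constructor
      · rintro (hm | ⟨x, hx, hc, rfl⟩)
        · exact Or.inl hm
        · exact Or.inr ⟨x, by simp [hx], hc, rfl⟩
      · rintro (hm | ⟨x, hx, hc, rfl⟩)
        · exact Or.inl hm
        · rcases List.mem_cons.mp hx with rfl | hx
          · exact absurd hc h
          · exact Or.inr ⟨x, hx, hc, rfl⟩

lemma pv_nodup_foldl_if_add {α β : Type} [BEq β] [LawfulBEq β] (L : List α) (c : α → Bool)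
    (g : α → β) (m : PySem.Set β) (hm : m.Nodup) :
    (L.foldl (fun m x => if c x then PySem.Set.add m (g x) else m) m).Nodup := by
  induction L generalizing m with
  | nil => exact hm
  | cons a rest ih =>
    rw [List.foldl_cons]
    apply ih
    split
    · exact PySem.Set.nodup_add _ _ hm
    · exact hm

-- membership in the nested (per-position, per-length) set-building fold
lemma pv_mem_foldl_foldl_if_add {α γ β : Type} [BEq β] [LawfulBEq β] (P : List α)
    (R : α → List γ) (c : α → γ → Bool) (g : α → γ → β) (m : PySem.Set β) (y : β) :
    (y ∈ P.foldl (fun m p => (R p).foldl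
        (fun m l => if c p l then PySem.Set.add m (g p l) else m) m) m)
      ↔ (y ∈ m ∨ ∃ p ∈ P, ∃ l ∈ R p, c p l = true ∧ y = g p l) := by
  induction P generalizing m with
  | nil => simp
  | cons a rest ih =>
    rw [List.foldl_cons, ih, pv_mem_foldl_if_add]
    constructor
    · rintro ((h | ⟨x, hx, hc, rfl⟩) | ⟨p, hp, l, hl, hc, rfl⟩)
      · exact Or.inl h
      · exact Or.inr ⟨a, by simp, x, hx, hc, rfl⟩
      · exact Or.inr ⟨p, by simp [hp], l, hl, hc, rfl⟩
    · rintro (h | ⟨p, hp, l, hl, hc, rfl⟩)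
      · exact Or.inl (Or.inl h)
      · rcases List.mem_cons.mp hp with rfl | hp
        · exact Or.inl (Or.inr ⟨l, hl, hc, rfl⟩)
        · exact Or.inr ⟨p, hp, l, hl, hc, rfl⟩

lemma pv_nodup_foldl_foldl_if_add {α γ β : Type} [BEq β] [LawfulBEq β] (P : List α)
    (R : α → List γ) (c : α → γ → Bool) (g : α → γ → β) (m : PySem.Set β) (hm : m.Nodup) :
    (P.foldl (fun m p => (R p).foldl
        (fun m l => if c p l then PySem.Set.add m (g p l) else m) m) m).Nodup := by
  induction P generalizing m with
  | nil => exact hm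
  | cons a rest ih =>
    rw [List.foldl_cons]
    exact ih _ (pv_nodup_foldl_if_add _ _ _ _ hm)

lemma pv_matched_nodup (d : PySem.Dict String (List String)) (maxlen : Int) (name : String) :
    (pvMatched d maxlen name).Nodup := by
  unfold pvMatched
  exact pv_nodup_foldl_foldl_if_add _ _ _ _ _ (by simp [PySem.Set.empty])

lemma pv_mem_matched_iff (d : PySem.Dict String (List String)) (maxlen : Int) (name y : String) :
    y ∈ pvMatched d maxlen name ↔
      ∃ p ∈ PySem.List.pyRange 0 (PySem.Str.len name) 1,
        ∃ l ∈ PySem.List.pyRange 1 (min maxlen (PySem.Str.len name - p) + 1) 1,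
          d.contains (PySem.Str.slice name (some p) (some (p + l))) = true ∧
          y = PySem.Str.slice name (some p) (some (p + l)) := by
  unfold pvMatched
  rw [pv_mem_foldl_foldl_if_add]
  simp [PySem.Set.empty]

lemma pv_matched_sub (d : PySem.Dict String (List String)) (maxlen : Int) (name y : String)
    (hy : y ∈ pvMatched d maxlen name) : y ∈ d.keys := by
  rw [pv_mem_matched_iff] at hy
  obtain ⟨p, _, l, _, hc, rfl⟩ := hy
  rwa [← PySem.Dict.contains_iff_mem_keys]

-- the heart of the equivalence: for a nonempty key of length ≤ maxlen present in the table,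
-- the substring enumeration finds it iff Python's `key in name` holds
lemma pv_mem_matched (d : PySem.Dict String (List String)) (maxlen : Int) (name k : String)
    (hmax : ∀ kk ∈ d.keys, PySem.Str.len kk ≤ maxlen)
    (hk : k ∈ d.keys) (hne : k.toList ≠ []) :
    (k ∈ pvMatched d maxlen name) ↔ PySem.Str.isIn k name = true := by
  have hcont : d.contains k = true := by
    simpa [PySem.Dict.contains_iff_mem_keys] using hk
  have hlen : (k.toList.length : Int) ≤ maxlen := by
    have := hmax k hk
    simpa [PySem.Str.len] using this
  have hn : PySem.Str.len name = (name.toList.length : Int) := by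
    simp [PySem.Str.len]
  rw [pv_mem_matched_iff]
  constructor
  · rintro ⟨p, hp, l, hl, -, hkeq⟩
    rw [PySem.List.mem_pyRange_one] at hp hl
    have hps : (PySem.Str.slice name (some p) (some (p + l))).toList
        = List.take ((p + l).toNat - p.toNat) (List.drop p.toNat name.toList) := by
      rw [PySem.Str.toList_slice, PySem.Chars.slice_eq_listSlice,
          PySem.List.slice_toNat _ hp.1 (by omega)]
    rw [PySem.Str.isIn_iff_infix, hkeq, hps]
    exact ((List.take_prefix _ _).isInfix).trans (List.drop_suffix _ _).isInfix
  · intro hin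
    have hin' : PySem.Chars.isIn k.toList name.toList = true := by
      simpa using hin
    obtain ⟨j, hpre⟩ := (PySem.Chars.exists_prefix_drop_iff_isIn (sub := k.toList)
        (s := name.toList)).mpr hin'
    have hkpos : 0 < k.toList.length := List.length_pos_iff.mpr hne
    have h1 : k.toList.length ≤ name.toList.length - j := by
      simpa using hpre.length_le
    have hlenle : k.toList.length + j ≤ name.toList.length := by omega
    have hslice : (PySem.Str.slice name (some (j : Int))
        (some ((j : Int) + (k.toList.length : Int)))).toList = k.toList := by
      rw [PySem.Str.toList_slice, PySem.Chars.slice_eq_listSlice,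
          PySem.List.slice_toNat _ (by positivity) (by positivity)]
      have h2 : ((j : Int) + (k.toList.length : Int)).toNat - ((j : Int)).toNat
          = k.toList.length := by omega
      rw [h2, Int.toNat_natCast]
      exact (List.prefix_iff_eq_take.mp hpre).symm
    have hks : PySem.Str.slice name (some (j : Int))
        (some ((j : Int) + (k.toList.length : Int))) = k := by
      apply String.ext
      simpa [String.toList] using hslice
    refine ⟨(j : Int), ?_, (k.toList.length : Int), ?_, ?_, ?_⟩
    · rw [PySem.List.mem_pyRange_one, hn]
      omega
    · rw [PySem.List.mem_pyRange_one]
      refine ⟨by omega, ?_⟩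
      rw [Int.lt_add_one_iff, le_min_iff, hn]
      omega
    · rw [hks]; exact hcont
    · rw [hks]

-- appending one name to each of a distinct list of existing keys, itemwise
lemma pv_perName (j : String) (M : List String) (d : PySem.Dict String (List String))
    (hM : M.Nodup) (hsub : ∀ k ∈ M, k ∈ d.keys) (hn : d.keys.Nodup) :
    (M.foldl (fun d k => d.modify k [] (fun l => l ++ [j])) d).items
      = d.items.map (fun p => if p.1 ∈ M then (p.1, p.2 ++ [j]) else p) := by
  induction M generalizing d with
  | nil =>
    symm
    apply (List.map_congr_left ?_).trans (List.map_id _)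
    intro p hp; simp
  | cons i rest ih =>
    have hi : i ∈ d.keys := hsub i (by simp)
    have hkeys := pv_modify_keys j i d hi
    rw [List.foldl_cons, ih _ hM.of_cons (fun k hk => hkeys ▸ hsub k (by simp [hk]))
        (hkeys ▸ hn), pv_modify_items d i _ hn hi, List.map_map]
    apply List.map_congr_left
    intro p hp
    obtain ⟨a, b⟩ := p
    have hinotrest : i ∉ rest := (List.nodup_cons.mp hM).1
    by_cases h : a = i
    · subst h
      simp [hinotrest]
    · by_cases h2 : a ∈ rest <;> simp [Function.comp, h, h2]

lemma pv_perName_keys (j : String) (M : List String) (d : PySem.Dict String (List String))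
    (hsub : ∀ k ∈ M, k ∈ d.keys) :
    (M.foldl (fun d k => d.modify k [] (fun l => l ++ [j])) d).keys = d.keys := by
  induction M generalizing d with
  | nil => rfl
  | cons i rest ih =>
    have hi : i ∈ d.keys := hsub i (by simp)
    rw [List.foldl_cons, ih _ (fun k hk => pv_modify_keys j i d hi ▸ hsub k (by simp [hk])),
        pv_modify_keys j i d hi]

-- B's matching phase: each entry collects exactly the names its key occurs in, in list order
lemma pv_outerB (names : List String) (maxlen : Int) (d : PySem.Dict String (List String))
    (hn : d.keys.Nodup) (hne : ∀ k ∈ d.keys, k.toList ≠ [])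
    (hmax : ∀ k ∈ d.keys, PySem.Str.len k ≤ maxlen) :
    (names.foldl (fun d name => (pvMatched d maxlen name).foldl
        (fun d key => d.modify key [] (fun lst => lst ++ [name])) d) d).items
      = d.items.map (fun p => (p.1, p.2 ++ names.filter (fun j => PySem.Str.isIn p.1 j))) := by
  induction names generalizing d with
  | nil =>
    symm
    apply (List.map_congr_left ?_).trans (List.map_id _)
    intro p hp; simp
  | cons j rest ih =>
    have hMsub := fun k hk => pv_matched_sub d maxlen j k hk
    have hkeys := pv_perName_keys j (pvMatched d maxlen j) d hMsub
    rw [List.foldl_cons, ih _ (hkeys ▸ hn) (fun k hk => hne k (hkeys ▸ hk))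
        (fun k hk => hmax k (hkeys ▸ hk)),
        pv_perName j (pvMatched d maxlen j) d (pv_matched_nodup d maxlen j) hMsub hn,
        List.map_map]
    apply List.map_congr_left
    intro p hp
    obtain ⟨a, b⟩ := p
    have ha : a ∈ d.keys := by
      simp only [PySem.Dict.keys, List.mem_map]
      exact ⟨(a, b), hp, rfl⟩
    have hiff := pv_mem_matched d maxlen j a hmax ha (hne a ha)
    by_cases h2 : PySem.Str.isIn a j = true
    · have : a ∈ pvMatched d maxlen j := hiff.mpr h2
      simp only [PySem.Str.isIn] at h2
      simp [Function.comp, this, PySem.Str.isIn, h2]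
    · have : a ∉ pvMatched d maxlen j := fun hc => h2 (hiff.mp hc)
      simp only [PySem.Str.isIn] at h2
      simp [Function.comp, this, PySem.Str.isIn, h2]

-- the (shared) key-building pass yields a dict with distinct keys
lemma pv_build_nodup (f : String → String) (ws : List String)
    (d : PySem.Dict String (List String)) (hn : d.keys.Nodup) :
    (ws.foldl (fun d w => if d.contains (f w) then d else d.insert (f w) []) d).keys.Nodup := by
  induction ws generalizing d with
  | nil => exact hn
  | cons w rest ih =>
    rw [List.foldl_cons]
    apply ih
    split
    · exact hn
    · exact PySem.Dict.nodup_keys_insert d (f w) [] hn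

-- every key of the built table is some name's first token
lemma pv_build_mem (f : String → String) (ws : List String)
    (d : PySem.Dict String (List String)) (k : String) :
    k ∈ (ws.foldl (fun d w => if d.contains (f w) then d
        else d.insert (f w) []) d).keys → k ∈ d.keys ∨ ∃ w ∈ ws, k = f w := by
  induction ws generalizing d with
  | nil => intro h; exact Or.inl h
  | cons w rest ih =>
    rw [List.foldl_cons]
    intro h
    rcases ih _ h with h' | ⟨w', hw', rfl⟩
    · by_cases hc : d.contains (f w) = true
      · rw [if_pos hc] at h'
        exact Or.inl h'
      · rw [if_neg hc, PySem.Dict.mem_keys_insert] at h'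
        rcases h' with rfl | h'
        · exact Or.inr ⟨w, by simp⟩
        · exact Or.inl h'
    · exact Or.inr ⟨w', by simp [hw']⟩

-- under Pre_, every token Python's split() produces is nonempty, so every key is nonempty
lemma pv_split_go_ne_nil (s : List Char) (cur : List Char) (acc : List (List Char))
    (hacc : ∀ u ∈ acc, u ≠ []) : ∀ t ∈ PySem.Chars.split₀.go s cur acc, t ≠ [] := by
  induction s generalizing cur acc with
  | nil =>
    intro t ht
    simp only [PySem.Chars.split₀.go] at ht
    by_cases hc : cur.isEmpty = true
    · rw [if_pos hc] at ht
      exact hacc t (by simpa using ht)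
    · rw [if_neg hc] at ht
      rw [List.mem_reverse, List.mem_cons] at ht
      rcases ht with rfl | ht
      · have : cur ≠ [] := by simpa [List.isEmpty_iff] using hc
        simpa using this
      · exact hacc t ht
  | cons c rest ih =>
    intro t ht
    simp only [PySem.Chars.split₀.go] at ht
    by_cases hsp : PySem.Chars.isspace c = true
    · rw [if_pos hsp] at ht
      by_cases hc : cur.isEmpty = true
      · rw [if_pos hc] at ht
        exact ih [] acc hacc t ht
      · rw [if_neg hc] at ht
        refine ih [] _ ?_ t ht
        intro u hu
        rcases List.mem_cons.mp hu with rfl | hu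
        · have : cur ≠ [] := by simpa [List.isEmpty_iff] using hc
          simpa using this
        · exact hacc u hu
    · rw [if_neg hsp] at ht
      exact ih (c :: cur) acc hacc t ht

lemma pv_token_ne_nil (s t : String) (ht : t ∈ PySem.Str.split₀ s) : t.toList ≠ [] := by
  have : t.toList ∈ PySem.Chars.split₀ s.toList := by
    rw [← PySem.Str.split₀_map_toList]
    exact List.mem_map_of_mem ht
  exact pv_split_go_ne_nil s.toList [] [] (by simp) t.toList this

lemma pv_keyOf_ne_nil (s : String) (hs : PySem.Str.split₀ s ≠ []) :
    (pvKeyOf s).toList ≠ [] := by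
  apply pv_token_ne_nil s
  unfold pvKeyOf
  apply PySem.List.pyGetD_mem
  simp only [PySem.Raise.InRange]
  have : 0 < (PySem.Str.split₀ s).length := List.length_pos_iff.mpr hs
  constructor <;> omega

lemma pv_foldl_maxif_eq (L : List String) (a : Int) :
    L.foldl (fun m k => if m < PySem.Str.len k then PySem.Str.len k else m) a
      = L.foldl (fun m k => max m (PySem.Str.len k)) a := by
  induction L generalizing a with
  | nil => rfl
  | cons x xs ih =>
    have hmx : (if a < PySem.Str.len x then PySem.Str.len x else a)
        = max a (PySem.Str.len x) := by
      rcases lt_or_ge a (PySem.Str.len x) with h | h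
      · rw [if_pos h, max_eq_right (le_of_lt h)]
      · rw [if_neg (not_lt.mpr h), max_eq_left h]
    rw [List.foldl_cons, List.foldl_cons, hmx, ih]

lemma pv_ports_eq (xs : List String) (hpre : Pre_name_lists xs) :
    name_lists xs = name_lists_alt xs := by
  unfold name_lists name_lists_alt pvBuckets
  simp only [PySem.List.foldl_append_singleton_eq_map, List.nil_append, List.foldl_map]
  rw [show (fun (d : PySem.Dict String (List String)) (i : String) =>
        if d.contains (PySem.List.pyGetD (PySem.Str.split₀ i) 0 "") then d
        else d.insert (PySem.List.pyGetD (PySem.Str.split₀ i) 0 "") [])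
      = fun d i => if d.contains (pvKeyOf i) then d else d.insert (pvKeyOf i) [] from rfl]
  generalize hd : List.foldl (fun d i =>
      if d.contains (pvKeyOf i) then d else d.insert (pvKeyOf i) []) PySem.Dict.empty xs = d
  have hnod : d.keys.Nodup := by
    rw [← hd]
    exact pv_build_nodup pvKeyOf xs PySem.Dict.empty PySem.Dict.nodup_keys_empty
  have hne : ∀ k ∈ d.keys, k.toList ≠ [] := by
    intro k hk
    rcases pv_build_mem pvKeyOf xs PySem.Dict.empty k (hd ▸ hk) with h | ⟨w, hw, rfl⟩
    · simp [PySem.Dict.keys_empty] at h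
    · exact pv_keyOf_ne_nil w (hpre.2 w hw)
  have hmax : ∀ k ∈ d.keys, PySem.Str.len k ≤ d.keys.foldl
      (fun m k => if m < PySem.Str.len k then PySem.Str.len k else m) 0 := by
    intro k hk
    rw [pv_foldl_maxif_eq, ← List.foldl_map]
    exact (PySem.List.le_foldl_max (d.keys.map PySem.Str.len) 0).2 _ (List.mem_map_of_mem hk)
  rw [show (fun (d : PySem.Dict String (List String)) (i : String) =>
        xs.foldl (fun d j => if PySem.Str.isIn i j then d.modify i [] (fun l => l ++ [j]) else d) d)
      = fun d i => xs.foldl (fun d j => pvStep j i d) d from rfl,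
      pv_outerA xs d.keys d hnod (fun k hk => hk) hnod,
      pv_outerB xs _ d hnod hne hmax]
  apply List.map_congr_left
  intro p hp
  have : p.1 ∈ d.keys := by
    simp only [PySem.Dict.keys, List.mem_map]
    exact ⟨p, hp, rfl⟩
  simp [this]

-- ===== VERDICT (by name: the statement is the Claim_ definition above) =====
theorem name_lists_spec : Claim_equal_name_lists := by
  intro xs _ hpre
  unfold Spec_name_lists
  exact pv_ports_eq xs hpre
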